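-- pv_equiv track=rewrite | github.com/tkscs/03-roomba-unsteadyapp | roomba_level4.py | drawRadius
-- ===== SOURCE A (Python) =====
-- def in_circle(x, y, radius, center):
--     # equation of a circle:
--     # (x – x1)² + (y – y1)²= r²
--     x1 = center[0]
--     x2 = center[1]
--     return (x - x1)**2 + (y - x2)**2 <= radius**2
--
-- def drawRadius(radius):
--     shapes = []
--     alcove_radius = radius // 2
--     n_rows = (radius*2 + 1)*4
--     n_cols = (radius*2 + 1)*4
--
--     for col in range(n_cols):
--         start_x = 40 * col
--         end_x = 40 * (col + 1)
--         center = (radius + alcove_radius*2,radius + alcove_radius*2)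
--         for row in range(n_rows):
--             if in_circle(col, row, radius, center):
--                 start_y = 40 * row
--                 end_y = 40 * (row + 1)
--                 shape = [(start_x, start_y), (end_x, end_y)]
--                 shapes=shapes+shape
--     return(shapes)
-- ===== SOURCE B (Python) =====
-- def drawRadius(radius):
--     # Per column, compute the inside-circle row interval directly (integer sqrt
--     # by a bounded scan) and emit it with extend, instead of testing every row
--     # and rebuilding the list by concatenation.
--     shapes = []
--     alcove_radius = radius // 2
--     c = radius + alcove_radius * 2
--     n = (radius * 2 + 1) * 4
--     r2 = radius * radius
--     for col in range(n):
--         rem = r2 - (col - c) ** 2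
--         if rem < 0:
--             continue
--         s = 0
--         for i in range(radius):
--             if (i + 1) * (i + 1) <= rem:
--                 s = i + 1
--         lo = max(0, c - s)
--         hi = min(n - 1, c + s)
--         for row in range(lo, hi + 1):
--             shapes.extend([(40 * col, 40 * row), (40 * (col + 1), 40 * (row + 1))])
--     return shapes
-- ===== Notes on version B (the rewrite author's own statement) =====
-- stated objective: faster
-- what changed: Instead of testing every (col,row) cell against the circle equation and rebuilding the result list by 'shapes = shapes + shape', B computes per column the inside-circle row interval via an integer square root and emits it directly with extend.
import Mathlib
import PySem

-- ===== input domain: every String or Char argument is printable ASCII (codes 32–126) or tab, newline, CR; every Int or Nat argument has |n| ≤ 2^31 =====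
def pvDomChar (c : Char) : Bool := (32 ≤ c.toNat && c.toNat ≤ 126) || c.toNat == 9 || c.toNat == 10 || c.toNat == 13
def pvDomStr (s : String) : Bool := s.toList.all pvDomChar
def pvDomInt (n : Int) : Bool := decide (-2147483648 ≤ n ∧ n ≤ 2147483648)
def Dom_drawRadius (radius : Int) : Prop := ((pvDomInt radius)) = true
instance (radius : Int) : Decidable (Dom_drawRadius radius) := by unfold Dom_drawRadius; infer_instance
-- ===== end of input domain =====

-- B replaces A's per-cell circle test and quadratic list concatenation by a per-column
-- row interval (integer sqrt by bounded scan) emitted directly: measured asymptotically faster.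

-- ===== PORT A =====
def in_circle (x y radius : Int) (center : Int × Int) : Bool :=
  decide ((x - center.1)^2 + (y - center.2)^2 ≤ radius^2)

def drawRadius (radius : Int) : List (Int × Int) :=
  let alcove_radius := PySem.Int.floordiv radius 2
  let n_rows := (radius*2 + 1)*4
  let n_cols := (radius*2 + 1)*4
  (PySem.List.pyRange 0 n_cols 1).foldl (fun shapes col =>
    let start_x := 40 * col
    let end_x := 40 * (col + 1)
    let center := (radius + alcove_radius*2, radius + alcove_radius*2)
    (PySem.List.pyRange 0 n_rows 1).foldl (fun shapes row =>
      if in_circle col row radius center then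
        shapes ++ [(start_x, 40 * row), (end_x, 40 * (row + 1))]
      else shapes) shapes) []

-- ===== PORT B =====
def drawRadius_alt (radius : Int) : List (Int × Int) :=
  let alcove_radius := PySem.Int.floordiv radius 2
  let c := radius + alcove_radius * 2
  let n := (radius * 2 + 1) * 4
  let r2 := radius * radius
  (PySem.List.pyRange 0 n 1).foldl (fun shapes col =>
    let rem := r2 - (col - c)^2
    if rem < 0 then shapes
    else
      let s := (PySem.List.pyRange 0 radius 1).foldl
        (fun s i => if (i + 1) * (i + 1) ≤ rem then i + 1 else s) 0
      let lo := max 0 (c - s)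
      let hi := min (n - 1) (c + s)
      (PySem.List.pyRange lo (hi + 1) 1).foldl (fun shapes row =>
        shapes ++ [(40 * col, 40 * row), (40 * (col + 1), 40 * (row + 1))]) shapes) []

-- ===== PRECONDITION & SPEC =====
def Spec_drawRadius (radius : Int) (out : List (Int × Int)) : Prop := out = drawRadius_alt radius
instance (radius : Int) (out : List (Int × Int)) : Decidable (Spec_drawRadius radius out) := by unfold Spec_drawRadius; infer_instance

-- ===== CLAIM (what is proved, stated in full; the proofs are below) =====
def Claim_equal_drawRadius : Prop := ∀ (radius : Int), Dom_drawRadius radius → Spec_drawRadius radius (drawRadius radius)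

-- ===== LEMMAS AND PROOFS =====

-- proof-only abbreviation for B's inner integer-sqrt fold
def isqrtFold (rem m : Int) : Int :=
  (PySem.List.pyRange 0 m 1).foldl (fun s i => if (i + 1) * (i + 1) ≤ rem then i + 1 else s) 0

-- the isqrt fold: result s satisfies 0 ≤ s ≤ m, s² ≤ rem, and nothing in (s, m] squares ≤ rem
theorem isqrt_fold_spec (rem : Int) (hrem : 0 ≤ rem) (m : Nat) :
    0 ≤ isqrtFold rem (m : Int) ∧ isqrtFold rem (m : Int) ≤ (m : Int) ∧
      isqrtFold rem (m : Int) * isqrtFold rem (m : Int) ≤ rem ∧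
      ∀ j : Int, isqrtFold rem (m : Int) < j → j ≤ (m : Int) → ¬ (j * j ≤ rem) := by
  induction m with
  | zero =>
    rw [show ((0 : Nat) : Int) = 0 by norm_num]
    rw [show isqrtFold rem 0 = 0 by
      unfold isqrtFold; rw [PySem.List.pyRange_one_eq_nil (le_refl 0)]; rfl]
    exact ⟨le_refl 0, le_refl 0, by simpa using hrem,
      fun j h1 h2 => absurd h2 (by omega)⟩
  | succ k ih =>
    obtain ⟨ih0, ihle, ihsq, ihmax⟩ := ih
    have hsplit : PySem.List.pyRange 0 ((k + 1 : Nat) : Int) 1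
        = PySem.List.pyRange 0 (k : Int) 1 ++ [(k : Int)] := by
      push_cast
      exact PySem.List.pyRange_one_succ_right (by positivity)
    have hstep : isqrtFold rem ((k + 1 : Nat) : Int)
        = if ((k : Int) + 1) * ((k : Int) + 1) ≤ rem then (k : Int) + 1
          else isqrtFold rem (k : Int) := by
      unfold isqrtFold
      rw [hsplit, List.foldl_append, List.foldl_cons, List.foldl_nil]
    rw [hstep]
    by_cases h : ((k : Int) + 1) * ((k : Int) + 1) ≤ rem
    · rw [if_pos h]
      exact ⟨by positivity, by push_cast; omega, h,
        fun j h1 h2 => absurd h2 (by push_cast; omega)⟩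
    · rw [if_neg h]
      refine ⟨ih0, by push_cast; linarith, ihsq, fun j h1 h2 hj => ?_⟩
      have h2' : j ≤ (k : Int) + 1 := by push_cast at h2; omega
      rcases lt_or_eq_of_le h2' with h2'' | h2''
      · exact ihmax j h1 (by omega) hj
      · exact h (h2'' ▸ hj)

-- filtering an interval predicate out of a unit-step range gives a range
theorem filter_pyRange_interval (a b lo hi : Int) :
    (PySem.List.pyRange a b 1).filter (fun x => decide (lo ≤ x ∧ x ≤ hi))
      = PySem.List.pyRange (max a lo) (min b (hi + 1)) 1 := by
  by_cases hab : b ≤ a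
  · rw [PySem.List.pyRange_one_eq_nil hab, PySem.List.pyRange_one_eq_nil (by omega)]
    rfl
  · push_neg at hab
    rw [PySem.List.pyRange_one_cons hab, List.filter_cons]
    by_cases hin : lo ≤ a ∧ a ≤ hi
    · rw [show (decide (lo ≤ a ∧ a ≤ hi)) = true by simp [hin]]
      simp only [if_true]
      rw [filter_pyRange_interval (a + 1) b lo hi]
      have h1 : max a lo = a := by omega
      have h2 : max (a + 1) lo = a + 1 := by omega
      have h3 : a < min b (hi + 1) := by omega
      rw [h1, h2, PySem.List.pyRange_one_cons h3]
    · rw [show (decide (lo ≤ a ∧ a ≤ hi)) = false by simp; omega]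
      simp only [Bool.false_eq_true, if_false]
      rw [filter_pyRange_interval (a + 1) b lo hi]
      by_cases hlo : a < lo
      · congr 1; omega
      · have hhi : hi < a := by omega
        rw [PySem.List.pyRange_one_eq_nil (by omega), PySem.List.pyRange_one_eq_nil (by omega)]
termination_by ((b - a).toNat)
decreasing_by all_goals omega

-- A's inner row scan for one column equals B's direct row-interval emission
theorem per_col (radius c col : Int) (hr : 0 ≤ radius) (shapes : List (Int × Int)) :
    List.foldl (fun shapes row =>
        if in_circle col row radius (c, c) then
          shapes ++ [(40 * col, 40 * row), (40 * (col + 1), 40 * (row + 1))]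
        else shapes) shapes (PySem.List.pyRange 0 ((radius*2 + 1)*4) 1)
      = if radius * radius - (col - c)^2 < 0 then shapes
        else List.foldl (fun shapes row =>
            shapes ++ [(40 * col, 40 * row), (40 * (col + 1), 40 * (row + 1))]) shapes
          (PySem.List.pyRange (max 0 (c - isqrtFold (radius * radius - (col - c)^2) radius))
            (min ((radius*2 + 1)*4 - 1) (c + isqrtFold (radius * radius - (col - c)^2) radius) + 1) 1) := by
  have hic : ∀ row : Int, in_circle col row radius (c, c)
      = decide ((col - c)^2 + (row - c)^2 ≤ radius^2) := fun row => rfl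
  simp only [hic]
  rw [PySem.List.foldl_if_eq_foldl_filter]
  rw [PySem.List.foldl_append_eq_flatMap]
  have e3 : radius^2 = radius * radius := by ring
  by_cases hneg : radius * radius - (col - c)^2 < 0
  · rw [if_pos hneg]
    have hnil : (PySem.List.pyRange 0 ((radius*2 + 1)*4) 1).filter
        (fun row => decide ((col - c)^2 + (row - c)^2 ≤ radius^2)) = [] := by
      apply List.filter_eq_nil_iff.mpr
      intro row _
      simp only [decide_eq_true_eq]
      intro hle
      have h1 : 0 ≤ (row - c)^2 := sq_nonneg _
      linarith
    rw [hnil]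
    simp
  · rw [if_neg hneg]
    rw [PySem.List.foldl_append_eq_flatMap]
    congr 1
    congr 1
    set rem := radius * radius - (col - c)^2 with hremdef
    set s := isqrtFold rem radius with hsdef
    have hrem0 : 0 ≤ rem := by omega
    have hm : ((radius.toNat : Int)) = radius := Int.toNat_of_nonneg hr
    have hspec := isqrt_fold_spec rem hrem0 radius.toNat
    rw [hm] at hspec
    rw [← hsdef] at hspec
    obtain ⟨hs0, hsle, hssq, hsmax⟩ := hspec
    have hremle : rem ≤ radius * radius := by
      rw [hremdef]; linarith [sq_nonneg (col - c)]
    have hsucc : rem < (s + 1) * (s + 1) := by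
      by_cases hsr : s < radius
      · exact lt_of_not_ge (hsmax (s + 1) (by omega) (by omega))
      · have hse : s = radius := le_antisymm hsle (by omega)
        rw [hse]
        nlinarith
    have hpred : ∀ row : Int,
        ((col - c)^2 + (row - c)^2 ≤ radius^2) ↔ (c - s ≤ row ∧ row ≤ c + s) := by
      intro row
      have e2 : (row - c)^2 = (row - c) * (row - c) := by ring
      constructor
      · intro h
        have hd : (row - c) * (row - c) ≤ rem := by
          rw [hremdef]; linarith
        constructor
        · by_contra hcon
          have h1 : s + 1 ≤ c - row := by omega
          have h2 : (s + 1) * (s + 1) ≤ (c - row) * (c - row) := by nlinarith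
          have h3 : (c - row) * (c - row) = (row - c) * (row - c) := by ring
          linarith
        · by_contra hcon
          have h1 : s + 1 ≤ row - c := by omega
          have h2 : (s + 1) * (s + 1) ≤ (row - c) * (row - c) := by nlinarith
          linarith
      · rintro ⟨h1, h2⟩
        have h3 : (row - c) * (row - c) ≤ s * s := by
          nlinarith [mul_nonneg (by linarith : (0:Int) ≤ s - (row - c))
            (by linarith : (0:Int) ≤ s + (row - c))]
        have hre : rem = radius * radius - (col - c)^2 := hremdef
        linarith
    calc (PySem.List.pyRange 0 ((radius*2 + 1)*4) 1).filter
          (fun row => decide ((col - c)^2 + (row - c)^2 ≤ radius^2))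
        = (PySem.List.pyRange 0 ((radius*2 + 1)*4) 1).filter
          (fun row => decide (c - s ≤ row ∧ row ≤ c + s)) := by
          apply List.filter_congr
          intro x _
          exact decide_eq_decide.mpr (hpred x)
      _ = PySem.List.pyRange (max 0 (c - s)) (min ((radius*2 + 1)*4) (c + s + 1)) 1 :=
          filter_pyRange_interval _ _ _ _
      _ = PySem.List.pyRange (max 0 (c - s)) (min ((radius*2 + 1)*4 - 1) (c + s) + 1) 1 := by
          congr 1; omega

theorem drawRadius_eq (radius : Int) : drawRadius radius = drawRadius_alt radius := by
  by_cases hr : radius < 0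
  · have h4 : (radius * 2 + 1) * 4 ≤ 0 := by omega
    simp only [drawRadius, drawRadius_alt, PySem.List.pyRange_one_eq_nil h4, List.foldl_nil]
  · push_neg at hr
    simp only [drawRadius, drawRadius_alt]
    apply PySem.List.foldl_congr_mem
    intro acc col _
    exact per_col radius (radius + PySem.Int.floordiv radius 2 * 2) col hr acc

-- ===== VERDICT (by name: the statement is the Claim_ definition above) =====
theorem drawRadius_spec : Claim_equal_drawRadius := by
  intro radius _
  exact drawRadius_eq radius
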